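-- pv_equiv track=rewrite | github.com/tn3w/is-crawler | snippets/crawler_url.py | crawler_url
-- ===== SOURCE A (Python) =====
-- _URL_STOPS = " );,"
--
-- def crawler_url(user_agent: str) -> str | None:
--     for marker in ("http://", "https://"):
--         index = 0
--         while (index := user_agent.find(marker, index)) != -1:
--             valid_prefix = (
--                 index == 0
--                 or user_agent[index - 1] in "+;"
--                 or user_agent[max(0, index - 3) : index] == " - "
--             )
--             if valid_prefix:
--                 end = index
--                 while end < len(user_agent) and user_agent[end] not in _URL_STOPS:
--                     end += 1
--                 return user_agent[index:end]
--             index += 1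
--     return None
-- ===== SOURCE B (Python) =====
-- def crawler_url(user_agent: str) -> str | None:
--     # Single left-to-right scan recording the first valid occurrence of each
--     # marker, instead of repeated str.find passes per marker.
--     http_hit = https_hit = None
--     for i in range(len(user_agent)):
--         if http_hit is not None:
--             break
--         if i == 0 or user_agent[i - 1] in "+;" or (i >= 3 and user_agent[i - 3:i] == " - "):
--             if user_agent.startswith("http://", i):
--                 http_hit = i
--             if https_hit is None and user_agent.startswith("https://", i):
--                 https_hit = i
--     hit = http_hit if http_hit is not None else https_hit
--     if hit is None:
--         return None
--     url = []
--     for ch in user_agent[hit:]: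
--         if ch in " );,":
--             break
--         url.append(ch)
--     return "".join(url)
-- ===== Notes on version B (the rewrite author's own statement) =====
-- stated objective: alternative
-- what changed: Replaces the per-marker repeated str.find scans (restarting after each invalid hit) by one single left-to-right pass that records the first valid occurrence of each marker simultaneously, plus a break-out takewhile loop for the URL tail.
import Mathlib
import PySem

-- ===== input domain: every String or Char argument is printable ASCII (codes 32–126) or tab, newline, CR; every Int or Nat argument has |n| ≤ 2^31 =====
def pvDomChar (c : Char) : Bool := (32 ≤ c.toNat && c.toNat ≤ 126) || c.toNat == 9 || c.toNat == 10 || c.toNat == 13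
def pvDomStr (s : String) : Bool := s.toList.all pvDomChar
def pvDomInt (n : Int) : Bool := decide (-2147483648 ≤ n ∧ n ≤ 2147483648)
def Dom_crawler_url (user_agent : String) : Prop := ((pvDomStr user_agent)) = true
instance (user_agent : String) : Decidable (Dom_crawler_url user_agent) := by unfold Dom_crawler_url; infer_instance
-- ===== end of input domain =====

-- B replaces A's per-marker repeated str.find passes by a single left-to-right scan
-- recording the first valid occurrence of each marker (objective: alternative single-pass
-- algorithm; equal return value proved for every input).

-- shared ports helper: membership in the Python constant _URL_STOPS = " );," (c in " );,")
def pvStop (c : Char) : Bool := c == ' ' || c == ')' || c == ';' || c == ','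

-- ===== PORT A =====
-- A's inner `while end < len and user_agent[end] not in _URL_STOPS: end += 1`
def pvA_end (s : List Char) (e : Nat) : Nat :=
  if h : e < s.length then
    if pvStop s[e] then e else pvA_end s (e + 1)
  else e
termination_by s.length - e

-- A's `valid_prefix = (index == 0 or user_agent[index-1] in "+;" or user_agent[max(0,index-3):index] == " - ")`
def pvA_valid (s : List Char) (i : Nat) : Bool :=
  i == 0 ||
  (match PySem.List.pyGet? s ((i : Int) - 1) with
   | some c => c == '+' || c == ';'
   | none => false) ||
  (PySem.List.slice s (some (max 0 ((i : Int) - 3))) (some (i : Int)) == [' ', '-', ' '])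

-- A's `while (index := user_agent.find(marker, index)) != -1: …`; the fuel only makes the
-- recursion structural (index strictly grows and stays ≤ len, so s.length + 1 fuel is enough)
def pvA_loop (s m : List Char) (index : Nat) (fuel : Nat) : Option (List Char) :=
  match fuel with
  | 0 => none
  | fuel + 1 =>
    let j := PySem.Chars.findFrom s m (index : Int)
    if j == -1 then none
    else
      let i := j.toNat
      if pvA_valid s i then
        some (PySem.List.slice s (some (i : Int)) (some ((pvA_end s i : Nat) : Int)))
      else pvA_loop s m (i + 1) fuel

-- A works on the string's code points (exact: all PySem Str primitives are Chars on toList)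
def crawler_url (user_agent : String) : Option String :=
  let s := user_agent.toList
  match pvA_loop s "http://".toList 0 (s.length + 1) with
  | some u => some (String.mk u)
  | none =>
    match pvA_loop s "https://".toList 0 (s.length + 1) with
    | some u => some (String.mk u)
    | none => none

-- ===== PORT B =====
-- B's `i == 0 or user_agent[i-1] in "+;" or (i >= 3 and user_agent[i-3:i] == " - ")`
-- (getD: the i-1 access only happens for 1 ≤ i ≤ len in the loop, where it is exact)
def pvB_valid (s : List Char) (i : Nat) : Bool :=
  i == 0 ||
  (s.getD (i - 1) ' ' == '+' || s.getD (i - 1) ' ' == ';') ||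
  (3 ≤ i && ((s.drop (i - 3)).take 3 == [' ', '-', ' ']))

-- B's single `for i in range(len(user_agent))` loop with the two hit registers and the break
def pvB_loop (s : List Char) : List Nat → Option Nat → Option Nat → Option Nat × Option Nat
  | [], h1, h2 => (h1, h2)
  | i :: rest, h1, h2 =>
    match h1 with
    | some _ => (h1, h2)   -- break once the http:// register is set
    | none =>
      if pvB_valid s i then
        -- user_agent.startswith(marker, i): exact for 0 ≤ i ≤ len as isPrefixOf on the drop
        let h1' := if ("http://".toList).isPrefixOf (s.drop i) then some i else none
        let h2' := if h2.isNone && ("https://".toList).isPrefixOf (s.drop i) then some i else h2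
        pvB_loop s rest h1' h2'
      else pvB_loop s rest h1 h2

-- B's `for ch in user_agent[hit:]: if ch in " );,": break; url.append(ch)` with "".join
def pvB_url (s : List Char) (acc : List Char) : List Char → List Char
  | [] => acc
  | c :: cs => if pvStop c then acc else pvB_url s (acc ++ [c]) cs

def crawler_url_alt (user_agent : String) : Option String :=
  let s := user_agent.toList
  let hits := pvB_loop s (List.range s.length) none none
  let hit := match hits.1 with | some i => some i | none => hits.2
  match hit with
  | none => none
  | some i => some (String.mk (pvB_url s [] (s.drop i)))

-- ===== PRECONDITION & SPEC =====
def Spec_crawler_url (user_agent : String) (out : Option String) : Prop := out = crawler_url_alt user_agent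
instance (user_agent : String) (out : Option String) : Decidable (Spec_crawler_url user_agent out) := by unfold Spec_crawler_url; infer_instance

-- ===== CLAIM (what is proved, stated in full; the proofs are below) =====
def Claim_equal_crawler_url : Prop := ∀ (user_agent : String), Dom_crawler_url user_agent → Spec_crawler_url user_agent (crawler_url user_agent)

-- ===== LEMMAS AND PROOFS =====

-- the canonical "valid hit of marker m at position i" predicate
def pvHit (s m : List Char) (i : Nat) : Bool := m.isPrefixOf (s.drop i) && pvB_valid s i

-- the first valid hit of m at a position ≥ k
def pvFirst (s m : List Char) (k : Nat) : Option Nat :=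
  (List.range' k (s.length + 1 - k)).find? (pvHit s m)

-- the URL text starting at a hit
def pvUrl (s : List Char) (i : Nat) : List Char := (s.drop i).takeWhile (fun c => !pvStop c)

lemma bool_ne_true {b : Bool} (h : ¬ b = true) : b = false := by
  cases b
  · rfl
  · exact absurd rfl h

lemma not_true_of_false {b : Bool} (h : b = false) : ¬ b = true := by
  rw [h]; exact Bool.false_ne_true

lemma hit_true (s m : List Char) (i : Nat) (h1 : m.isPrefixOf (s.drop i) = true)
    (h2 : pvB_valid s i = true) : pvHit s m i = true := by
  unfold pvHit; rw [h1, h2]; rfl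

-- ---- generic find?/range' helpers ----
lemma find?_range'_shift (p : Nat → Bool) (k n d : Nat) (hd : d ≤ n)
    (h : ∀ i, k ≤ i → i < k + d → p i = false) :
    (List.range' k n).find? p = (List.range' (k + d) (n - d)).find? p := by
  induction d generalizing k n with
  | zero => simp
  | succ d ih =>
    cases n with
    | zero => omega
    | succ n =>
      have hstep : (List.range' k (n + 1)).find? p = (List.range' (k + 1) n).find? p := by
        have : List.range' k (n + 1) = k :: List.range' (k + 1) n := by simp [List.range']
        rw [this, List.find?_cons_of_neg (by simp [h k (le_refl _) (by omega)])]
      rw [hstep]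
      have hrec := ih (k + 1) n (by omega) (by intro i h1 h2; exact h i (by omega) (by omega))
      rw [hrec]
      have e1 : k + 1 + d = k + (d + 1) := by omega
      have e2 : n - d = n + 1 - (d + 1) := by omega
      rw [e1, e2]

lemma find?_range'_eq_some (p : Nat → Bool) (k n j : Nat) (hkj : k ≤ j) (hj : j < k + n)
    (hpj : p j = true) (hlt : ∀ i, k ≤ i → i < j → p i = false) :
    (List.range' k n).find? p = some j := by
  rw [find?_range'_shift p k n (j - k) (by omega)
    (by intro i h1 h2; exact hlt i h1 (by omega))]
  have hk : k + (j - k) = j := by omega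
  rw [hk]
  cases hn : n - (j - k) with
  | zero => omega
  | succ n' =>
    have : List.range' j (n' + 1) = j :: List.range' (j + 1) n' := by simp [List.range']
    rw [this, List.find?_cons_of_pos hpj]

-- ---- relating the two valid-prefix tests ----
lemma valid_eq (s : List Char) (i : Nat) (hi : i ≤ s.length) :
    pvA_valid s i = pvB_valid s i := by
  unfold pvA_valid pvB_valid
  by_cases h0 : i = 0
  · subst h0; simp
  · have h1 : 1 ≤ i := by omega
    have hmid : (match PySem.List.pyGet? s ((i : Int) - 1) with
        | some c => c == '+' || c == ';'
        | none => false) = (s.getD (i - 1) ' ' == '+' || s.getD (i - 1) ' ' == ';') := by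
      have hcast : (i : Int) - 1 = ((i - 1 : Nat) : Int) := by omega
      rw [hcast, PySem.List.pyGet?_natCast]
      have hlt : (i - 1) < s.length := by omega
      simp [List.getD, List.getElem?_eq_getElem hlt]
    rw [hmid]
    by_cases h3 : 3 ≤ i
    · have hcast : max 0 ((i : Int) - 3) = ((i - 3 : Nat) : Int) := by omega
      rw [hcast, PySem.List.slice_natCast]
      have h33 : i - (i - 3) = 3 := by omega
      rw [h33]
      simp [h3]
    · have hcast : max 0 ((i : Int) - 3) = ((0 : Nat) : Int) := by omega
      rw [hcast, PySem.List.slice_natCast]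
      simp only [List.drop_zero]
      have hlen : (List.take (i - 0) s).length ≤ 2 := by
        simp; omega
      have hne : (List.take (i - 0) s == [' ', '-', ' ']) = false := by
        rw [beq_eq_false_iff_ne]
        intro he
        rw [he] at hlen; simp at hlen
      rw [hne]
      simp [h3]

-- ---- A's end scan is a takeWhile ----
lemma pvA_end_spec (s : List Char) (e : Nat) :
    pvA_end s e = e + ((s.drop e).takeWhile (fun c => !pvStop c)).length := by
  unfold pvA_end
  split
  · rename_i h
    have hd : s.drop e = s[e] :: s.drop (e + 1) := List.drop_eq_getElem_cons h
    rw [hd]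
    by_cases hs : pvStop s[e]
    · simp [hs, List.takeWhile]
    · simp only [hs, if_neg, Bool.not_eq_true]
      rw [pvA_end_spec s (e + 1)]
      simp [List.takeWhile, hs]
      omega
  · rename_i h
    rw [List.drop_eq_nil_of_le (by omega)]
    simp
termination_by s.length - e

lemma slice_end_eq_url (s : List Char) (i : Nat) :
    PySem.List.slice s (some (i : Int)) (some ((pvA_end s i : Nat) : Int)) = pvUrl s i := by
  rw [PySem.List.slice_natCast, pvA_end_spec]
  have he : i + ((s.drop i).takeWhile (fun c => !pvStop c)).length - i
      = ((s.drop i).takeWhile (fun c => !pvStop c)).length := by omega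
  rw [he, pvUrl]
  have hpre := List.takeWhile_prefix (l := s.drop i) (fun c => !pvStop c)
  exact (List.prefix_iff_eq_take.mp hpre).symm

-- ---- B's url loop is a takeWhile ----
lemma pvB_url_spec (s : List Char) (acc l : List Char) :
    pvB_url s acc l = acc ++ l.takeWhile (fun c => !pvStop c) := by
  induction l generalizing acc with
  | nil => simp [pvB_url]
  | cons c cs ih =>
    unfold pvB_url
    by_cases hc : pvStop c
    · simp [hc, List.takeWhile]
    · simp [hc, List.takeWhile, ih]

-- ---- A's find loop returns the first valid hit ----
lemma no_hit_of_not_infix (s m : List Char) (k i : Nat) (hk : k ≤ i)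
    (hinf : ¬ m <:+: s.drop k) : m.isPrefixOf (s.drop i) = false := by
  apply bool_ne_true
  intro h
  have hpre : m <+: s.drop i := List.isPrefixOf_iff_prefix.mp h
  apply hinf
  rw [List.infix_iff_prefix_suffix]
  refine ⟨s.drop i, hpre, ?_⟩
  have hdd : s.drop i = (s.drop k).drop (i - k) := by
    rw [List.drop_drop]; congr 1; omega
  rw [hdd]; exact List.drop_suffix _ _

lemma hit_false_of_no_prefix (s m : List Char) (i : Nat) (h : m.isPrefixOf (s.drop i) = false) :
    pvHit s m i = false := by
  unfold pvHit; rw [h]; rfl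

lemma hit_false_of_invalid (s m : List Char) (i : Nat) (h : pvB_valid s i = false) :
    pvHit s m i = false := by
  unfold pvHit; rw [h]; simp

lemma pvA_loop_spec (s m : List Char) (hm : m ≠ []) :
    ∀ fuel k, k ≤ s.length → s.length + 1 ≤ fuel + k →
    pvA_loop s m k fuel = (pvFirst s m k).map (pvUrl s) := by
  intro fuel
  induction fuel with
  | zero => intro k hk hf; omega
  | succ fuel ih =>
    intro k hk hf
    unfold pvA_loop
    by_cases hneg : PySem.Chars.findFrom s m (k : Int) = -1
    · rw [if_pos (by simp [hneg])]
      have hinf := (PySem.Chars.findFrom_natCast_eq_neg_one_iff s m k hk).mp hneg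
      have hfn : pvFirst s m k = none := by
        rw [pvFirst, List.find?_eq_none]
        intro x hx
        rw [List.mem_range'_1] at hx
        rw [hit_false_of_no_prefix s m x (no_hit_of_not_infix s m k x hx.1 hinf)]
        simp
      rw [hfn]; rfl
    · rw [if_neg (by simp [hneg])]
      obtain ⟨hge, hpre, hmin⟩ := PySem.Chars.findFrom_natCast_spec s m k hk hneg
      generalize hj : (PySem.Chars.findFrom s m (k : Int)).toNat = j
      rw [hj] at hpre hmin
      have hkj : k ≤ j := by
        subst hj
        exact (Int.le_toNat (le_trans (Int.natCast_nonneg k) hge)).mpr hge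
      clear hge hneg
      have hjlen : j < s.length := by
        by_contra h
        rw [List.drop_eq_nil_of_le (by omega)] at hpre
        exact hm (List.prefix_nil.mp hpre)
      by_cases hv : pvA_valid s j
      · rw [if_pos hv]
        have hvB : pvB_valid s j := by rw [← valid_eq s j (by omega)]; exact hv
        have hfs : pvFirst s m k = some j := by
          apply find?_range'_eq_some _ _ _ _ hkj (by omega)
          · exact hit_true s m j (List.isPrefixOf_iff_prefix.mpr hpre) hvB
          · intro i h1 h2
            apply hit_false_of_no_prefix
            apply bool_ne_true
            intro hp
            exact hmin i h1 h2 (List.isPrefixOf_iff_prefix.mp hp)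
        rw [hfs, Option.map_some, slice_end_eq_url]
      · rw [if_neg hv]
        have hvB : pvB_valid s j = false := by
          rw [← valid_eq s j (by omega)]; exact bool_ne_true hv
        have hshift : pvFirst s m k = pvFirst s m (j + 1) := by
          rw [pvFirst, pvFirst,
            find?_range'_shift (pvHit s m) k (s.length + 1 - k) (j + 1 - k)
              (by omega)
              (by
                intro i h1 h2
                by_cases hij : i < j
                · apply hit_false_of_no_prefix
                  apply bool_ne_true
                  intro hp
                  exact hmin i h1 hij (List.isPrefixOf_iff_prefix.mp hp)
                · have hij' : i = j := by omega
                  subst hij'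
                  exact hit_false_of_invalid s m i hvB)]
          have e1 : k + (j + 1 - k) = j + 1 := by omega
          have e2 : s.length + 1 - k - (j + 1 - k) = s.length + 1 - (j + 1) := by omega
          rw [e1, e2]
        rw [hshift]
        exact ih (j + 1) (by omega) (by omega)

-- ---- B's scan loop returns the first hits of both markers ----
lemma pvB_loop_break (s : List Char) (L : List Nat) (j : Nat) (h2 : Option Nat) :
    pvB_loop s L (some j) h2 = (some j, h2) := by
  cases L <;> rfl

lemma pvB_loop_spec (s : List Char) :
    ∀ n k h2,
    (pvB_loop s (List.range' k n) none h2).1 = (List.range' k n).find? (pvHit s "http://".toList)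
    ∧ ((List.range' k n).find? (pvHit s "http://".toList) = none →
       (pvB_loop s (List.range' k n) none h2).2
         = (match h2 with | some x => some x | none => (List.range' k n).find? (pvHit s "https://".toList))) := by
  intro n
  induction n with
  | zero =>
    intro k h2
    constructor
    · rfl
    · intro _; cases h2 <;> rfl
  | succ n ih =>
    intro k h2
    have hcons : List.range' k (n + 1) = k :: List.range' (k + 1) n := by simp [List.range']
    rw [hcons]
    simp only [pvB_loop]
    by_cases hv : pvB_valid s k
    · rw [if_pos hv]
      by_cases hp1 : ("http://".toList).isPrefixOf (s.drop k)
      · rw [if_pos hp1, pvB_loop_break]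
        have hhit : pvHit s "http://".toList k = true := hit_true s _ k hp1 hv
        constructor
        · rw [List.find?_cons_of_pos hhit]
        · intro hnone
          rw [List.find?_cons_of_pos hhit] at hnone
          exact absurd hnone (by simp)
      · have hp1' : ("http://".toList).isPrefixOf (s.drop k) = false := bool_ne_true hp1
        rw [if_neg hp1]
        have hhit1 : pvHit s "http://".toList k = false := hit_false_of_no_prefix s _ k hp1'
        obtain ⟨ih1, ih2⟩ := ih (k + 1)
          (if h2.isNone && ("https://".toList).isPrefixOf (s.drop k) then some k else h2)
        constructor
        · rw [ih1, List.find?_cons_of_neg (not_true_of_false hhit1)]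
        · intro hnone
          rw [List.find?_cons_of_neg (not_true_of_false hhit1)] at hnone
          rw [ih2 hnone]
          cases hh2 : h2 with
          | some x => rfl
          | none =>
            by_cases hp2 : ("https://".toList).isPrefixOf (s.drop k)
            · have hhit2 : pvHit s "https://".toList k = true := hit_true s _ k hp2 hv
              have hc : (Option.isNone (none : Option Nat)
                  && ("https://".toList).isPrefixOf (s.drop k)) = true := by rw [hp2]; rfl
              rw [hc, if_pos rfl, List.find?_cons_of_pos hhit2]
            · have hp2' : ("https://".toList).isPrefixOf (s.drop k) = false := bool_ne_true hp2
              have hhit2 : pvHit s "https://".toList k = false :=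
                hit_false_of_no_prefix s _ k hp2'
              have hc : (Option.isNone (none : Option Nat)
                  && ("https://".toList).isPrefixOf (s.drop k)) = false := by rw [hp2']; rfl
              rw [hc, if_neg Bool.false_ne_true, List.find?_cons_of_neg (not_true_of_false hhit2)]
    · have hv' : pvB_valid s k = false := bool_ne_true hv
      rw [if_neg hv]
      have hhit1 : pvHit s "http://".toList k = false := hit_false_of_invalid s _ k hv'
      have hhit2 : pvHit s "https://".toList k = false := hit_false_of_invalid s _ k hv'
      obtain ⟨ih1, ih2⟩ := ih (k + 1) h2
      constructor
      · rw [ih1, List.find?_cons_of_neg (not_true_of_false hhit1)]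
      · intro hnone
        rw [List.find?_cons_of_neg (not_true_of_false hhit1)] at hnone
        rw [ih2 hnone]
        cases h2 with
        | some x => rfl
        | none => rw [List.find?_cons_of_neg (not_true_of_false hhit2)]

-- find? over range' 0 len equals pvFirst (the extra index len is never a hit)
lemma find?_range_eq_first (s m : List Char) (hm : m ≠ []) :
    (List.range' 0 s.length).find? (pvHit s m) = pvFirst s m 0 := by
  rw [pvFirst]
  have h0 : s.length + 1 - 0 = s.length + 1 := by omega
  rw [h0, List.range'_concat]
  simp only [one_mul, Nat.zero_add]
  rw [List.find?_append]
  have hlast : pvHit s m s.length = false := by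
    apply hit_false_of_no_prefix
    rw [List.drop_length]
    cases m with
    | nil => exact absurd rfl hm
    | cons c cs => rfl
  simp [hlast]

-- ===== VERDICT (by name: the statement is the Claim_ definition above) =====
theorem crawler_url_spec : Claim_equal_crawler_url := by
  intro ua _
  unfold Spec_crawler_url crawler_url crawler_url_alt
  dsimp only
  simp only [List.range_eq_range']
  have hA1 := pvA_loop_spec ua.toList "http://".toList (by decide)
    (ua.toList.length + 1) 0 (by omega) (by omega)
  have hA2 := pvA_loop_spec ua.toList "https://".toList (by decide)
    (ua.toList.length + 1) 0 (by omega) (by omega)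
  obtain ⟨hB1, hB2⟩ := pvB_loop_spec ua.toList ua.toList.length 0 none
  rw [find?_range_eq_first ua.toList "http://".toList (by decide)] at hB1
  rw [hA1, hA2, hB1]
  cases h1 : pvFirst ua.toList "http://".toList 0 with
  | some i =>
    simp [pvB_url_spec, pvUrl]
  | none =>
    have hB2' := hB2 (by rw [find?_range_eq_first ua.toList "http://".toList (by decide), h1])
    rw [find?_range_eq_first ua.toList "https://".toList (by decide)] at hB2'
    simp only [Option.map_none]
    rw [hB2']
    cases h2 : pvFirst ua.toList "https://".toList 0 with
    | some i => simp [pvB_url_spec, pvUrl]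
    | none => rfl
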